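-- pv_equiv track=rewrite | github.com/RobbertDHuisman/AdventOfCode2024 | day_25/part_1.py | get_lengths
-- ===== SOURCE A (Python) =====
-- def get_lengths(scheme):
--     lengths = []
--     for i in range(0, len(scheme[0])):
--         length = -1
--         for j in scheme:
--             if j[i:i+1] == "#":
--                 length += 1
--
--         lengths.append(length)
--
--     return lengths
-- ===== SOURCE B (Python) =====
-- def get_lengths(scheme):
--     positions = [i for row in scheme for i, ch in enumerate(row) if ch == "#"]
--     hits = {}
--     for p in positions:
--         hits[p] = hits.get(p, 0) + 1
--     return [hits.get(i, 0) - 1 for i in range(len(scheme[0]))]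
-- ===== Notes on version B (the rewrite author's own statement) =====
-- stated objective: alternative
-- what changed: B collects all '#' positions into one flat list, tallies them in a dict (hash counter), then answers each column by a dict lookup, replacing A's per-column rescans of every row.
import Mathlib
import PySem

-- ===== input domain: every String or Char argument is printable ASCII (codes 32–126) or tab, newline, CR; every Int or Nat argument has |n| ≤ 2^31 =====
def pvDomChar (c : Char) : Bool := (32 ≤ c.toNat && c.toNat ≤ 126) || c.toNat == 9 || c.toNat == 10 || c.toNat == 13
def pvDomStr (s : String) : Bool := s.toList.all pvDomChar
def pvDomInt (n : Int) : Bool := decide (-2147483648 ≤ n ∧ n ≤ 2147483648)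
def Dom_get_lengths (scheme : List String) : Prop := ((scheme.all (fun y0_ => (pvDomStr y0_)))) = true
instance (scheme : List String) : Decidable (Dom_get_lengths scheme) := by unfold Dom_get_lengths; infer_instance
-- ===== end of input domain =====

-- B tallies the '#' positions of all rows in a dict and answers columns by lookup; A rescans every row per column.

-- ===== PORT A =====
-- literal port of A: for i in range(0, len(scheme[0])): length = -1; for j in scheme: if j[i:i+1] == "#": length += 1; lengths.append(length)
def get_lengths (scheme : List String) : List Int :=
  match PySem.List.pyGet? scheme 0 with
  | none => []  -- scheme[0] raises IndexError; excluded by Pre_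
  | some s0 =>
    (PySem.List.pyRange 0 (PySem.Str.len s0) 1).foldl
      (fun lengths i =>
        lengths ++ [scheme.foldl
          (fun length j => if PySem.Str.slice j (some i) (some (i + 1)) = "#" then length + 1 else length)
          (-1)])
      []

-- ===== PORT B =====
-- positions = [i for row in scheme for i, ch in enumerate(row) if ch == "#"]
def altPositions (scheme : List String) : List Int :=
  scheme.flatMap (fun row =>
    ((PySem.List.enumerate row.toList 0).filter (fun p => p.2 == '#')).map (·.1))

def get_lengths_alt (scheme : List String) : List Int :=
  let positions := altPositions scheme
  -- hits = {}; for p in positions: hits[p] = hits.get(p, 0) + 1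
  let hits := positions.foldl (fun d p => d.insert p (d.getD p 0 + 1)) PySem.Dict.empty
  -- [hits.get(i, 0) - 1 for i in range(len(scheme[0]))]
  match PySem.List.pyGet? scheme 0 with
  | none => []  -- len(scheme[0]) raises IndexError; excluded by Pre_
  | some s0 => (PySem.List.pyRange 0 (PySem.Str.len s0) 1).map (fun i => hits.getD i 0 - 1)

-- ===== PRECONDITION & SPEC =====
-- Pre_ excludes only the empty list, on which A (scheme[0]) raises IndexError.
def Pre_get_lengths (scheme : List String) : Prop := scheme ≠ []
instance (scheme : List String) : Decidable (Pre_get_lengths scheme) := by unfold Pre_get_lengths; infer_instance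
def pvWitness_get_lengths : List String := ["##.", ".#"]

def Spec_get_lengths (scheme : List String) (out : List Int) : Prop := out = get_lengths_alt scheme
instance (scheme : List String) (out : List Int) : Decidable (Spec_get_lengths scheme out) := by unfold Spec_get_lengths; infer_instance

-- ===== CLAIM (what is proved, stated in full; the proofs are below) =====
def Claim_equal_get_lengths : Prop := ∀ (scheme : List String), Dom_get_lengths scheme → Pre_get_lengths scheme → Spec_get_lengths scheme (get_lengths scheme)

-- ===== LEMMAS AND PROOFS =====

-- number of rows whose k-th character is '#'
def cnt (rows : List String) (k : Nat) : Int :=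
  match rows with
  | [] => 0
  | r :: rs => (if r.toList[k]? = some '#' then 1 else 0) + cnt rs k

theorem foldl_append_singleton {α β : Type} (f : α → β) :
    ∀ (l : List α) (acc : List β),
      l.foldl (fun a x => a ++ [f x]) acc = acc ++ l.map f := by
  intro l
  induction l with
  | nil => simp
  | cons x xs ih => intro acc; simp [List.foldl, ih]

theorem slice_one_eq_hash (xs : List Char) (k : Nat) :
    (PySem.List.slice xs (some (k : Int)) (some ((k : Int) + 1)) = ['#'])
      ↔ xs[k]? = some '#' := by
  have h1 : ((1 : Int)) = ((1 : Nat) : Int) := by norm_num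
  rw [h1, PySem.List.slice_natCast_add]
  rw [← List.head?_drop]
  cases h : xs.drop k with
  | nil => simp
  | cons c rest => simp [List.take]

theorem inner_fold (k : Nat) :
    ∀ (rows : List String) (init : Int),
      rows.foldl
        (fun length j =>
          if PySem.Str.slice j (some ((0 : Int) + (k : Nat))) (some ((0 : Int) + (k : Nat) + 1)) = "#"
          then length + 1 else length) init
      = init + cnt rows k := by
  intro rows
  induction rows with
  | nil => intro init; simp [cnt]
  | cons r rs ih =>
    intro init
    have hc : (PySem.Str.slice r (some ((0 : Int) + (k : Nat))) (some ((0 : Int) + (k : Nat) + 1)) = "#")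
        ↔ r.toList[k]? = some '#' := by
      constructor
      · intro h
        have := congrArg String.toList h
        rw [PySem.Str.toList_slice] at this
        simp at this
        exact (slice_one_eq_hash r.toList k).mp (by simpa using this)
      · intro h
        have h2 := (slice_one_eq_hash r.toList k).mpr h
        have : (PySem.Str.slice r (some ((0:Int) + (k:Nat))) (some ((0:Int) + (k:Nat) + 1))).toList = "#".toList := by
          rw [PySem.Str.toList_slice]; simpa using h2
        exact String.toList_inj.mp (by simpa using this)
    simp only [List.foldl, cnt]
    by_cases h : r.toList[k]? = some '#'
    · rw [if_pos (hc.mpr h), ih]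
      simp [h]; ring
    · rw [if_neg (fun hh => h (hc.mp hh)), ih]
      simp [h]

theorem a_eq_model (scheme : List String) (s0 : String) :
    (PySem.List.pyRange 0 (PySem.Str.len s0) 1).foldl
      (fun lengths i =>
        lengths ++ [scheme.foldl
          (fun length j => if PySem.Str.slice j (some i) (some (i + 1)) = "#" then length + 1 else length)
          (-1)])
      []
    = (List.range s0.toList.length).map (fun k => -1 + cnt scheme k) := by
  rw [PySem.List.pyRange_one]
  rw [foldl_append_singleton]
  have hlen : ((PySem.Str.len s0 - 0).toNat) = s0.toList.length := by
    simp [PySem.Str.len_eq]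
  rw [hlen, List.nil_append, List.map_map]
  apply List.map_congr_left
  intro k _
  simp only [Function.comp]
  rw [inner_fold k scheme (-1)]

-- B side: the '#'-positions of one row, as produced by the comprehension
def rowpos (t : List Char) (s : Int) : List Int :=
  ((PySem.List.enumerate t s).filter (fun p => p.2 == '#')).map (·.1)

theorem mem_rowpos {t : List Char} {s x : Int} (h : x ∈ rowpos t s) :
    ∃ (k : Nat), x = s + k := by
  unfold rowpos at h
  obtain ⟨p, hp, rfl⟩ := List.mem_map.mp h
  have hmem := List.mem_filter.mp hp |>.1
  obtain ⟨k, hk, rfl⟩ := (PySem.List.mem_enumerate_iff _ _ _).mp hmem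
  exact ⟨k, rfl⟩

theorem rowpos_count_lt {t : List Char} {s x : Int} (h : x < s) :
    (rowpos t s).count x = 0 := by
  rw [List.count_eq_zero]
  intro hmem
  obtain ⟨k, rfl⟩ := mem_rowpos hmem
  omega

theorem rowpos_count :
    ∀ (t : List Char) (s : Int) (k : Nat),
      (rowpos t s).count (s + k) = (if t[k]? = some '#' then 1 else 0) := by
  intro t
  induction t with
  | nil => intro s k; simp [rowpos, PySem.List.enumerate_nil]
  | cons c t ih =>
    intro s k
    have hrec : rowpos (c :: t) s
        = (if c == '#' then [s] else []) ++ rowpos t (s + 1) := by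
      unfold rowpos
      rw [PySem.List.enumerate_cons]
      by_cases h : c = '#' <;> simp [h]
    rw [hrec, List.count_append]
    cases k with
    | zero =>
      have h0 : (rowpos t (s + 1)).count (s + ((0 : Nat) : Int)) = 0 :=
        rowpos_count_lt (by omega)
      rw [h0]
      by_cases h : c = '#' <;> simp [h]
    | succ k =>
      have hk : s + ((k + 1 : Nat) : Int) = (s + 1) + (k : Nat) := by push_cast; ring
      have h2 : (rowpos t (s + 1)).count (s + ((k + 1 : Nat) : Int))
          = if t[k]? = some '#' then 1 else 0 := by
        rw [hk]; exact ih (s + 1) k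
      have h1 : ((if c == '#' then [s] else []) : List Int).count (s + ((k + 1 : Nat) : Int)) = 0 := by
        by_cases h : c = '#'
        · simp [h, List.count_cons]
          omega
        · simp [h]
      rw [h1, h2]
      simp

theorem positions_count :
    ∀ (scheme : List String) (k : Nat),
      ((altPositions scheme).count ((k : Nat) : Int) : Int) = cnt scheme k := by
  intro scheme
  induction scheme with
  | nil => intro k; simp [altPositions, cnt]
  | cons r rs ih =>
    intro k
    have hsplit : altPositions (r :: rs) = rowpos r.toList 0 ++ altPositions rs := by
      simp [altPositions, rowpos]
    rw [hsplit, List.count_append]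
    have h0 : ((0 : Int) + (k : Nat)) = ((k : Nat) : Int) := by ring
    have := rowpos_count r.toList 0 k
    rw [h0] at this
    rw [this]
    simp only [cnt]
    rw [← ih k]
    push_cast
    by_cases h : r.toList[k]? = some '#' <;> simp [h]

-- ===== VERDICT (by name: the statement is the Claim_ definition above) =====
theorem get_lengths_spec : Claim_equal_get_lengths := by
  intro scheme _ hpre
  unfold Spec_get_lengths get_lengths get_lengths_alt
  cases hs : scheme with
  | nil => exact absurd hs hpre
  | cons s0 rest =>
    have hget : PySem.List.pyGet? (s0 :: rest) (0 : Int) = some s0 := by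
      simp [PySem.List.pyGet?, PySem.List.pyIdx?]
    rw [hget]
    dsimp only
    rw [a_eq_model (s0 :: rest) s0]
    rw [PySem.List.pyRange_one]
    have hlen : ((PySem.Str.len s0 - 0).toNat) = s0.toList.length := by
      simp [PySem.Str.len_eq]
    rw [hlen, List.map_map]
    apply List.map_congr_left
    intro k _
    simp only [Function.comp]
    rw [PySem.Dict.getD_foldl_insert_add_one, PySem.Dict.getD_empty]
    have h0k : ((0 : Int) + (k : Nat)) = ((k : Nat) : Int) := by ring
    rw [h0k, positions_count (s0 :: rest) k]
    ring
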